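-- pv_equiv track=rewrite | github.com/mg-ferreira/solucoes_semana2_PBD | tarefa_semana2.py | friends_per_gender_bad
-- ===== SOURCE A (Python) =====
-- def friends_per_gender_bad (user):
--     Masc = 0
--     Fem = 0
--     for friend in user['friends']:
--         if friend['gender'] == 'M':
--             Masc +=1
--         else:
--             Fem +=1
--     return (Masc, Fem)
-- ===== SOURCE B (Python) =====
-- def friends_per_gender_bad(user):
--     def count(fs):
--         if not fs:
--             return (0, 0)
--         m, f = count(fs[1:])
--         if fs[0]['gender'] == 'M':
--             return (m + 1, f)
--         return (m, f + 1)
--     return count(user['friends'])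
-- ===== Notes on version B (the rewrite author's own statement) =====
-- stated objective: alternative
-- what changed: B replaces A's iterative loop with two running accumulators by a structural recursion on the friends list: the counts for the tail are computed first by the recursive call and the head's contribution is added on the way back out.
import Mathlib
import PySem

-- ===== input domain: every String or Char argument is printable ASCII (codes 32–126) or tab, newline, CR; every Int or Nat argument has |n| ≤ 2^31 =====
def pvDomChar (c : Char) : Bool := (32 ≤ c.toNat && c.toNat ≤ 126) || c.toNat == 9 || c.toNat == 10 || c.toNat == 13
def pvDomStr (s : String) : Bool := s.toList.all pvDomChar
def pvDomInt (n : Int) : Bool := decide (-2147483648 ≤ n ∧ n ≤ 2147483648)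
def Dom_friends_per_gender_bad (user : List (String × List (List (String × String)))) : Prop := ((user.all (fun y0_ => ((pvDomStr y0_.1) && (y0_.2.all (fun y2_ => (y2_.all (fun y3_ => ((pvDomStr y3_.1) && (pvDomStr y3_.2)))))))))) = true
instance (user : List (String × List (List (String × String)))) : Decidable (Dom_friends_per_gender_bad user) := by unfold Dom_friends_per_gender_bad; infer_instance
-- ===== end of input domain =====

-- B counts recursively on the list structure (tail first, head added on return) instead of A's loop with two accumulators; same O(n) cost.


-- ===== PORT A =====
def friends_per_gender_bad (user : List (String × List (List (String × String)))) : Int × Int :=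
  ((List.lookup "friends" user).getD []).foldl
    (fun mf friend =>
      if (List.lookup "gender" friend).getD "" = "M" then (mf.1 + 1, mf.2)
      else (mf.1, mf.2 + 1))
    ((0 : Int), (0 : Int))

-- ===== PORT B =====
-- B's inner recursive helper 'count': empty list → (0,0); otherwise recurse on the tail
-- and add the head's contribution afterwards.
def pvCountB : List (List (String × String)) → Int × Int
  | [] => (0, 0)
  | f :: t =>
    let mf := pvCountB t
    if (List.lookup "gender" f).getD "" = "M" then (mf.1 + 1, mf.2)
    else (mf.1, mf.2 + 1)

def friends_per_gender_bad_alt (user : List (String × List (List (String × String)))) : Int × Int :=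
  pvCountB ((List.lookup "friends" user).getD [])

-- ===== PRECONDITION & SPEC =====
-- Pre_ excludes exactly the inputs on which the Python A raises KeyError: a user with no
-- 'friends' key, or a friend with no 'gender' key.
def Pre_friends_per_gender_bad (user : List (String × List (List (String × String)))) : Prop :=
  (List.lookup "friends" user).isSome = true ∧
  ∀ f ∈ (List.lookup "friends" user).getD [], (List.lookup "gender" f).isSome = true
instance (user : List (String × List (List (String × String)))) : Decidable (Pre_friends_per_gender_bad user) := by unfold Pre_friends_per_gender_bad; infer_instance
def pvWitness_friends_per_gender_bad : (List (String × List (List (String × String)))) :=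
  [("friends", [[("gender", "M")], [("gender", "F")]])]
def Spec_friends_per_gender_bad (user : List (String × List (List (String × String)))) (out : Int × Int) : Prop := out = friends_per_gender_bad_alt user
instance (user : List (String × List (List (String × String)))) (out : Int × Int) : Decidable (Spec_friends_per_gender_bad user out) := by unfold Spec_friends_per_gender_bad; infer_instance

-- ===== CLAIM (what is proved, stated in full; the proofs are below) =====
def Claim_equal_friends_per_gender_bad : Prop := ∀ (user : List (String × List (List (String × String)))), Dom_friends_per_gender_bad user → Pre_friends_per_gender_bad user → Spec_friends_per_gender_bad user (friends_per_gender_bad user)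

-- ===== LEMMAS AND PROOFS =====
lemma foldl_eq_countB (fs : List (List (String × String))) (m f : Int) :
    fs.foldl
      (fun mf friend =>
        if (List.lookup "gender" friend).getD "" = "M" then (mf.1 + 1, mf.2)
        else (mf.1, mf.2 + 1))
      (m, f)
    = (m + (pvCountB fs).1, f + (pvCountB fs).2) := by
  induction fs generalizing m f with
  | nil => simp [pvCountB]
  | cons a t ih =>
    simp only [List.foldl_cons, pvCountB]
    by_cases h : (List.lookup "gender" a).getD "" = "M"
    · simp only [if_pos h, ih, Prod.mk.injEq]; constructor <;> first | trivial | ring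
    · simp only [if_neg h, ih, Prod.mk.injEq]; constructor <;> first | trivial | ring

-- ===== VERDICT (by name: the statement is the Claim_ definition above) =====
theorem friends_per_gender_bad_spec : Claim_equal_friends_per_gender_bad := by
  intro user _ _
  unfold Spec_friends_per_gender_bad friends_per_gender_bad friends_per_gender_bad_alt
  rw [foldl_eq_countB]
  simp
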